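-- pv_equiv track=rewrite | github.com/jatinarora2702/Competitive-Coding | codeforces/2119C.py | solve
-- ===== SOURCE A (Python) =====
-- def solve(n: int, l: int, r: int, k: int):
--     if n % 2 == 1:
--         return l
--     if n == 2:
--         return -1
--     x = 2
--     while x <= l:
--         x *= 2
--     if x > r:
--         return -1
--     if k < n - 1:
--         return l
--     return x
-- ===== SOURCE B (Python) =====
-- def solve(n: int, l: int, r: int, k: int):
--     if n % 2 == 1:
--         return l
--     if n == 2:
--         return -1
--     x = 2 if l < 2 else (1 << l.bit_length())
--     if x > r:
--         return -1
--     if k < n - 1: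
--         return l
--     return x
-- ===== Notes on version B (the rewrite author's own statement) =====
-- stated objective: simpler
-- what changed: The doubling while-loop that searches for the smallest power of two greater than l is replaced by a closed-form bit computation (1 << l.bit_length(), floored at 2), so no loop is executed.
import Mathlib
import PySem

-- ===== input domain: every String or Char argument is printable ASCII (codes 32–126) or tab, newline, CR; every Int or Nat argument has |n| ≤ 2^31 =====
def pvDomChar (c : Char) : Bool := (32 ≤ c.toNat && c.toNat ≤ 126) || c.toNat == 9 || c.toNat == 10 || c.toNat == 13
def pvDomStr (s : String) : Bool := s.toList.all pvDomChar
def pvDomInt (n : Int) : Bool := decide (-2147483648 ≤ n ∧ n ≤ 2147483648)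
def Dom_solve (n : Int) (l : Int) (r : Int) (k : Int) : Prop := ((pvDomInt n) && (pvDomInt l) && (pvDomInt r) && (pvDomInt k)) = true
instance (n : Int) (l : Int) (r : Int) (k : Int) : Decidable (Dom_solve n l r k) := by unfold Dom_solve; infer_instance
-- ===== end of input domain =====

-- B replaces A's doubling while-loop with a closed-form bit computation; objective: simpler.

-- ===== PORT A =====
-- the 'while x <= l: x *= 2' loop; hx is only the termination fact 0 < x (x starts at 2)
def solveLoop (l : Int) (x : Int) (hx : 0 < x) : Int :=
  if x ≤ l then solveLoop l (x * 2) (by omega) else x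
  termination_by (l + 1 - x).toNat
  decreasing_by omega

def solve (n : Int) (l : Int) (r : Int) (k : Int) : Int :=
  if n % 2 = 1 then l
  else if n = 2 then -1
  else
    let x := solveLoop l 2 (by norm_num)
    if x > r then -1
    else if k < n - 1 then l
    else x

-- ===== PORT B =====
-- x = 2 if l < 2 else (1 << l.bit_length()); bit_length(m) = Nat.log2 m + 1 for m ≥ 1
def solve_alt (n : Int) (l : Int) (r : Int) (k : Int) : Int :=
  if n % 2 = 1 then l
  else if n = 2 then -1
  else
    let x : Int := if l < 2 then 2 else 2 ^ (Nat.log2 l.toNat + 1)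
    if x > r then -1
    else if k < n - 1 then l
    else x

-- ===== PRECONDITION & SPEC =====
def Spec_solve (n : Int) (l : Int) (r : Int) (k : Int) (out : Int) : Prop := out = solve_alt n l r k
instance (n : Int) (l : Int) (r : Int) (k : Int) (out : Int) : Decidable (Spec_solve n l r k out) := by unfold Spec_solve; infer_instance

-- ===== CLAIM (what is proved, stated in full; the proofs are below) =====
def Claim_equal_solve : Prop := ∀ (n : Int) (l : Int) (r : Int) (k : Int), Dom_solve n l r k → Spec_solve n l r k (solve n l r k)

-- ===== LEMMAS AND PROOFS =====

theorem loop_stop (l x : Int) (hx : 0 < x) (h : l < x) : solveLoop l x hx = x := by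
  unfold solveLoop; rw [if_neg (by omega)]

theorem loop_main (l : Int) (hl : 2 ≤ l) :
    ∀ d e, 1 ≤ e → Nat.log2 l.toNat + 1 - e = d →
      ∀ x (hx : 0 < x), x = 2 ^ e → x ≤ l →
        solveLoop l x hx = 2 ^ (Nat.log2 l.toNat + 1) := by
  have hL0 : l.toNat ≠ 0 := by omega
  intro d
  induction d with
  | zero =>
      intro e he hd x hx hxe hxl
      exfalso
      have h1 : (2 : Int) ^ e ≤ l := hxe ▸ hxl
      have h2 : 2 ^ e ≤ l.toNat := by
        have : ((2 ^ e : Nat) : Int) ≤ l := by push_cast; exact h1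
        omega
      have h3 : e ≤ Nat.log2 l.toNat := (Nat.le_log2 hL0).mpr h2
      omega
  | succ d ih =>
      intro e he hd x hx hxe hxl
      have h1 : (2 : Int) ^ e ≤ l := hxe ▸ hxl
      have h2 : 2 ^ e ≤ l.toNat := by
        have : ((2 ^ e : Nat) : Int) ≤ l := by push_cast; exact h1
        omega
      have h3 : e ≤ Nat.log2 l.toNat := (Nat.le_log2 hL0).mpr h2
      unfold solveLoop
      rw [if_pos hxl]
      by_cases h : x * 2 ≤ l
      · exact ih (e + 1) (by omega) (by omega) (x * 2) (by omega)
          (by rw [hxe, pow_succ]) h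
      · rw [loop_stop l (x * 2) (by omega) (by omega)]
        have h4 : l.toNat < 2 ^ (e + 1) := by
          have : l < ((2 ^ (e + 1) : Nat) : Int) := by
            push_cast; rw [pow_succ]; omega
          omega
        have h5 : Nat.log2 l.toNat < e + 1 := (Nat.log2_lt hL0).mpr h4
        have he' : e = Nat.log2 l.toNat := by omega
        rw [hxe, ← pow_succ, he']

theorem loop_closed (l : Int) (h2 : (0 : Int) < 2) :
    solveLoop l 2 h2 = if l < 2 then 2 else 2 ^ (Nat.log2 l.toNat + 1) := by
  by_cases h : l < 2
  · rw [if_pos h]; exact loop_stop l 2 h2 h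
  · rw [if_neg h]
    exact loop_main l (by omega) (Nat.log2 l.toNat + 1 - 1) 1 le_rfl rfl 2 h2 (by norm_num) (by omega)

-- ===== VERDICT (by name: the statement is the Claim_ definition above) =====
theorem solve_spec : Claim_equal_solve := by
  intro n l r k _
  unfold Spec_solve solve solve_alt
  rw [loop_closed]
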